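-- pv_equiv track=rewrite | github.com/liviadlacourt/IFES_Prog2 | libplnbsi.py | uniao
-- ===== SOURCE A (Python) =====
-- def separaPal(pTexto):
-- 	strSeparadores = ' ,!?.:;/-_\\()[]{}'
-- 	strBuffer = ""
-- 	lstPalavras = []
--
-- 	for i in range(len(pTexto)):
-- 		if pTexto[i] not in strSeparadores:
-- 			strBuffer += pTexto[i]
-- 		elif strBuffer != "":
-- 			lstPalavras.append(strBuffer)
-- 			strBuffer = ""
-- 		#
-- 	#
-- 	if strBuffer != "":
-- 		lstPalavras.append(strBuffer)
-- 	#
-- 	return lstPalavras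
--
-- def uniao(pTexto1, pTexto2):
-- 	lstTexto1 = separaPal(pTexto1)
-- 	lstTexto2 = separaPal(pTexto2)
-- 	u = []
--
-- 	for texto1 in lstTexto1:
-- 		if texto1 not in u:
-- 			u.append(texto1)
-- 		#
-- 	#
--
-- 	for texto2 in lstTexto2:
-- 		if texto2 not in u:
-- 			u.append(texto2)
-- 		#
-- 	#
--
-- 	return u
-- ===== SOURCE B (Python) =====
-- def uniao(pTexto1, pTexto2):
--     seps = ' ,!?.:;/-_\\()[]{}'
--
--     def toks(t):
--         # two-pointer run extraction: skip separators, slice out each maximal run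
--         words = []
--         i, n = 0, len(t)
--         while i < n:
--             if t[i] in seps:
--                 i += 1
--             else:
--                 j = i
--                 while j < n and t[j] not in seps:
--                     j += 1
--                 words.append(t[i:j])
--                 i = j
--         return words
--
--     # insertion-ordered dedup in one pass over both token lists
--     return list(dict.fromkeys(toks(pTexto1) + toks(pTexto2)))
-- ===== Notes on version B (the rewrite author's own statement) =====
-- stated objective: idiomatic
-- what changed: Tokenization by two-pointer maximal-run slicing instead of a per-character buffer state machine, and a single dict.fromkeys ordered dedup over both token lists instead of two quadratic membership-test loops.
import Mathlib
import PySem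

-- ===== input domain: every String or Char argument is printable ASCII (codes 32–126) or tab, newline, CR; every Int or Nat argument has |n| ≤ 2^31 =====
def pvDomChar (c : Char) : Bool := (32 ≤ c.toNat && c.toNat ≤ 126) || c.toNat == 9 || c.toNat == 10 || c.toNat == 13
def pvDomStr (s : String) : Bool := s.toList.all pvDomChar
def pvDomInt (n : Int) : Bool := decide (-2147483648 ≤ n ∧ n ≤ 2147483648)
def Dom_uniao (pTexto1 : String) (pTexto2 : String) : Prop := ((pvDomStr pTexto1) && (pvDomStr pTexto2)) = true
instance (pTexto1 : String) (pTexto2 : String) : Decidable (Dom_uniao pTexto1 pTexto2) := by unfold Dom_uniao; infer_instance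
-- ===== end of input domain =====

-- B replaces the per-character buffer state machine with two-pointer maximal-run slicing and a
-- single insertion-ordered dedup (dict.fromkeys) over both token lists; objective: idiomatic.


-- ===== PORT A =====
-- strSeparadores = ' ,!?.:;/-_\()[]{}'
def sepA : List Char := " ,!?.:;/-_\\()[]{}".toList

-- loop body of separaPal: state = (strBuffer as List Char, lstPalavras)
def stepA (st : List Char × List String) (c : Char) : List Char × List String :=
  if ¬ sepA.contains c then (st.1 ++ [c], st.2)
  else if st.1 ≠ [] then ([], st.2 ++ [String.ofList st.1])
  else st

def separaPal (pTexto : String) : List String :=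
  let st := pTexto.toList.foldl stepA ([], [])
  if st.1 ≠ [] then st.2 ++ [String.ofList st.1] else st.2

def uniao (pTexto1 : String) (pTexto2 : String) : List String :=
  let lstTexto1 := separaPal pTexto1
  let lstTexto2 := separaPal pTexto2
  let u := lstTexto1.foldl (fun u t => if t ∈ u then u else u ++ [t]) []
  lstTexto2.foldl (fun u t => if t ∈ u then u else u ++ [t]) u

-- ===== PORT B =====
def sepB (c : Char) : Bool := " ,!?.:;/-_\\()[]{}".toList.contains c

-- Source B's toks: skip a separator, or slice out the maximal non-separator run and continue after it
def toksB : List Char → List (List Char)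
  | [] => []
  | c :: cs =>
    if sepB c then toksB cs
    else (c :: cs.takeWhile (fun d => !sepB d)) :: toksB (cs.dropWhile (fun d => !sepB d))
termination_by t => t.length
decreasing_by
  · simp
  · have := List.length_dropWhile_le (p := fun d => !sepB d) (l := cs)
    simp; omega

def uniao_alt (pTexto1 : String) (pTexto2 : String) : List String :=
  PySem.List.dedup ((toksB pTexto1.toList).map String.ofList ++ (toksB pTexto2.toList).map String.ofList)

-- ===== PRECONDITION & SPEC =====
def Spec_uniao (pTexto1 : String) (pTexto2 : String) (out : List String) : Prop := out = uniao_alt pTexto1 pTexto2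
instance (pTexto1 : String) (pTexto2 : String) (out : List String) : Decidable (Spec_uniao pTexto1 pTexto2 out) := by unfold Spec_uniao; infer_instance

-- ===== CLAIM (what is proved, stated in full; the proofs are below) =====
def Claim_equal_uniao : Prop := ∀ (pTexto1 : String) (pTexto2 : String), Dom_uniao pTexto1 pTexto2 → Spec_uniao pTexto1 pTexto2 (uniao pTexto1 pTexto2)

-- ===== LEMMAS AND PROOFS =====

-- the buffer state machine, run from any state and flushed at the end, produces the
-- already-emitted words followed by B's run-sliced tokens (the pending buffer opening the first one)
def flushA (st : List Char × List String) : List String :=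
  if st.1 ≠ [] then st.2 ++ [String.ofList st.1] else st.2

theorem machine_eq_toksB (cs : List Char) : ∀ (buf : List Char) (ws : List String),
    flushA (cs.foldl stepA (buf, ws)) =
    ws ++ (if buf = [] then (toksB cs).map String.ofList
           else String.ofList (buf ++ cs.takeWhile (fun d => !sepB d)) ::
                (toksB (cs.dropWhile (fun d => !sepB d))).map String.ofList) := by
  induction cs with
  | nil =>
    intro buf ws
    by_cases h : buf = [] <;> simp [flushA, h, toksB]
  | cons c cs ih =>
    intro buf ws
    by_cases hc : sepB c
    · have hc' : c ∈ sepA := by simpa [sepA, sepB] using hc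
      by_cases hb : buf = []
      · have hstep : stepA (buf, ws) c = ([], ws) := by
          simp [stepA, hc', hb]
        rw [List.foldl_cons, hstep, ih [] ws]
        simp [toksB, hc, hb]
      · have hstep : stepA (buf, ws) c = ([], ws ++ [String.ofList buf]) := by
          simp [stepA, hc', hb]
        rw [List.foldl_cons, hstep, ih [] (ws ++ [String.ofList buf])]
        simp [hb, hc, toksB]
    · have hc' : c ∉ sepA := by simpa [sepA, sepB] using hc
      by_cases hb : buf = []
      · have hstep : stepA (buf, ws) c = ([c], ws) := by
          simp [stepA, hc', hb]
        rw [List.foldl_cons, hstep, ih [c] ws]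
        simp [toksB, hc, hb]
      · have hstep : stepA (buf, ws) c = (buf ++ [c], ws) := by
          simp [stepA, hc']
        rw [List.foldl_cons, hstep, ih (buf ++ [c]) ws]
        simp [hb, hc]

theorem separaPal_eq_toksB (p : String) : separaPal p = (toksB p.toList).map String.ofList := by
  have := machine_eq_toksB p.toList [] []
  simpa [separaPal, flushA] using this

-- A's membership-test accumulation is PySem.Set.add
theorem foldl_mem_eq_add (xs : List String) : ∀ (u : List String),
    xs.foldl (fun u t => if t ∈ u then u else u ++ [t]) u = xs.foldl PySem.Set.add u := by
  induction xs with
  | nil => intro u; rfl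
  | cons x xs ih =>
    intro u
    by_cases h : x ∈ u <;> simp [PySem.Set.add, h, ih]

-- ===== VERDICT (by name: the statement is the Claim_ definition above) =====
theorem uniao_spec : Claim_equal_uniao := by
  intro t1 t2 _
  show uniao t1 t2 = uniao_alt t1 t2
  unfold uniao uniao_alt
  rw [separaPal_eq_toksB, separaPal_eq_toksB, foldl_mem_eq_add, foldl_mem_eq_add,
      ← List.foldl_append]
  rfl
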